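-- pv_equiv track=rewrite | github.com/g-d-l/project_euler | done/154.py | digit_sum_base_p
-- ===== SOURCE A (Python) =====
-- def digit_sum_base_p(n, p):
--     power = 1
--     while power <= n:
--         power *= p
--     power //= p
--     result = 0
--     while power >= 1:
--         digit = n // power
--         n -= digit * power
--         result += digit
--         power //= p
--
--     return result
-- ===== SOURCE B (Python) =====
-- def digit_sum_base_p(n, p):
--     result = 0
--     while n > 0:
--         result += n % p
--         n //= p
--     return result
-- ===== Notes on version B (the rewrite author's own statement) =====
-- stated objective: idiomatic
-- what changed: B replaces A's two-phase scheme (wind a power of p up past n, then extract digits high-to-low with digit*power subtraction) by the standard single least-significant-first loop: while n > 0: result += n % p; n //= p.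
-- outside the precondition, e.g. on digit_sum_base_p(1, -2): A returns 0, B returns -1
import Mathlib
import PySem

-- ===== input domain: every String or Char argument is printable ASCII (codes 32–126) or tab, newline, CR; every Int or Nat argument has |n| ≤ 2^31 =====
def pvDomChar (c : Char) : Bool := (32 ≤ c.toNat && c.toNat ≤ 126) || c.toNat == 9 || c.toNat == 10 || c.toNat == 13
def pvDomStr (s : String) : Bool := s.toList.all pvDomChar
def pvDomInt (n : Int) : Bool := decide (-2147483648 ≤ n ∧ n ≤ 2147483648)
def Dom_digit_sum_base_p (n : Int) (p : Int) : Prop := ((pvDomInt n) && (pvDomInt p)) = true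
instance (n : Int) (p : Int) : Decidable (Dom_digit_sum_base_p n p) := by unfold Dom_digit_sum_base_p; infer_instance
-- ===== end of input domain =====

-- B replaces A's wind-up-then-extract two-loop scheme by the standard least-significant-first
-- digit-sum loop (idiomatic, same asymptotic cost).

-- ===== PORT A =====
-- first while loop: power = 1; while power <= n: power *= p
-- (fuel 100; inside Dom with Pre_ the loop runs at most 32 iterations, so the fuel is never exhausted)
def pvLoop1 (n p : Int) : Nat → Int → Int
  | 0, power => power
  | f + 1, power => if power ≤ n then pvLoop1 n p f (power * p) else power

-- second while loop: while power >= 1: digit = n // power; n -= digit*power; result += digit; power //= p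
def pvLoop2 (p : Int) : Nat → Int → Int → Int → Int
  | 0, _, _, result => result
  | f + 1, m, power, result =>
      if 1 ≤ power then
        pvLoop2 p f (m - PySem.Int.floordiv m power * power) (PySem.Int.floordiv power p)
          (result + PySem.Int.floordiv m power)
      else result

def digit_sum_base_p (n : Int) (p : Int) : Int :=
  pvLoop2 p 100 n (PySem.Int.floordiv (pvLoop1 n p 100 1) p) 0

-- ===== PORT B =====
-- result = 0; while n > 0: result += n % p; n //= p   (fuel 100, never exhausted inside Dom ∧ Pre_)
def pvLoopB (p : Int) : Nat → Int → Int → Int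
  | 0, _, result => result
  | f + 1, m, result =>
      if 0 < m then pvLoopB p f (PySem.Int.floordiv m p) (result + PySem.Int.mod m p) else result

def digit_sum_base_p_alt (n : Int) (p : Int) : Int := pvLoopB p 100 n 0

-- ===== PRECONDITION & SPEC =====
-- Pre_ excludes: bases p ≤ -2 with n ≥ 1, where A always returns 0 by accident (its wind-up power
-- overshoots n and the final negative floor-division kills the extraction loop) while B's modulo
-- form returns other base-dependent values — neither is a meaningful digit sum, the function's
-- natural domain is base p ≥ 2; and p ∈ {0, 1} with n ≥ 1 resp. n ≤ 0, where A diverges or raises.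
def Pre_digit_sum_base_p (n : Int) (p : Int) : Prop := 2 ≤ p ∨ (n ≤ 0 ∧ p ≤ -1)
instance (n : Int) (p : Int) : Decidable (Pre_digit_sum_base_p n p) := by
  unfold Pre_digit_sum_base_p; infer_instance

def pvWitness_digit_sum_base_p : Int × Int := (10, 2)

def Spec_digit_sum_base_p (n : Int) (p : Int) (out : Int) : Prop := out = digit_sum_base_p_alt n p
instance (n : Int) (p : Int) (out : Int) : Decidable (Spec_digit_sum_base_p n p out) := by
  unfold Spec_digit_sum_base_p; infer_instance

-- ===== CLAIM (what is proved, stated in full; the proofs are below) =====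
def Claim_equal_digit_sum_base_p : Prop := ∀ (n : Int) (p : Int), Dom_digit_sum_base_p n p →
  Pre_digit_sum_base_p n p → Spec_digit_sum_base_p n p (digit_sum_base_p n p)

-- ===== LEMMAS AND PROOFS =====

-- reference: digit sum of a natural number in base p
def pvDS (p : Nat) : Nat → Nat
  | n => if h : 2 ≤ p ∧ 0 < n then n % p + pvDS p (n / p) else 0
  termination_by n => n
  decreasing_by exact Nat.div_lt_self h.2 (by omega)

lemma pvDS_zero (p : Nat) : pvDS p 0 = 0 := by
  rw [pvDS]; simp

lemma pvDS_rec (p : Nat) (hp : 2 ≤ p) (n : Nat) : pvDS p n = n % p + pvDS p (n / p) := by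
  rcases Nat.eq_zero_or_pos n with h | h
  · subst h; simp [pvDS_zero]
  · rw [pvDS]; simp [hp, h]

lemma pvDS_small (p : Nat) (hp : 2 ≤ p) (n : Nat) (h : n < p) : pvDS p n = n := by
  rw [pvDS_rec p hp, Nat.mod_eq_of_lt h, Nat.div_eq_of_lt h, pvDS_zero]
  omega

lemma pvDS_split (p : Nat) (hp : 2 ≤ p) (j : Nat) :
    ∀ n, pvDS p n = pvDS p (n / p ^ j) + pvDS p (n % p ^ j) := by
  induction j with
  | zero => intro n; simp [Nat.mod_one, pvDS_zero]
  | succ j ih =>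
    intro n
    have h1 : n / p / p ^ j = n / p ^ (j + 1) := by
      rw [Nat.div_div_eq_div_mul, pow_succ']
    have h2 : (n % p ^ (j + 1)) % p = n % p := by
      exact Nat.mod_mod_of_dvd n (dvd_pow_self p (by omega))
    have h3 : (n % p ^ (j + 1)) / p = (n / p) % p ^ j := by
      rw [pow_succ']; exact Nat.mod_mul_right_div_self n p (p ^ j)
    rw [pvDS_rec p hp n, ih (n / p), h1,
      pvDS_rec p hp (n % p ^ (j + 1)), h2, h3]
    omega

-- B's loop computes the digit sum
lemma pvLoopB_eq (p : Int) (hp : 2 ≤ p) :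
    ∀ (fuel : Nat) (m : Nat) (acc : Int), m < p.toNat ^ fuel →
      pvLoopB p fuel (m : Int) acc = acc + (pvDS p.toNat m : Int) := by
  have hpc : ((p.toNat : Nat) : Int) = p := Int.toNat_of_nonneg (by omega)
  have hP : 2 ≤ p.toNat := by omega
  intro fuel
  induction fuel with
  | zero =>
    intro m acc h
    have : m = 0 := by simpa using h
    subst this
    simp [pvLoopB, pvDS_zero]
  | succ f ih =>
    intro m acc h
    rcases Nat.eq_zero_or_pos m with hm | hm
    · subst hm; simp [pvLoopB, pvDS_zero]
    · have hcond : (0 : Int) < (m : Int) := by exact_mod_cast hm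
      have hdiv : PySem.Int.floordiv (m : Int) p = ((m / p.toNat : Nat) : Int) := by
        rw [← hpc]; exact PySem.Int.floordiv_natCast m p.toNat
      have hmod : PySem.Int.mod (m : Int) p = ((m % p.toNat : Nat) : Int) := by
        rw [← hpc]; exact PySem.Int.mod_natCast m p.toNat
      have hlt : m / p.toNat < p.toNat ^ f := by
        rw [Nat.div_lt_iff_lt_mul (by omega)]
        calc m < p.toNat ^ (f + 1) := h
          _ = p.toNat ^ f * p.toNat := pow_succ _ _
      rw [pvLoopB, if_pos hcond, hdiv, hmod, ih _ _ hlt, pvDS_rec p.toNat hP m]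
      push_cast
      ring

-- A's first loop finds the first power of p exceeding n
lemma pvLoop1_spec (n p : Int) (hp : 2 ≤ p) :
    ∀ (fuel : Nat) (power : Int), 1 ≤ power → n < power * p ^ fuel →
      ∃ j : Nat, pvLoop1 n p fuel power = power * p ^ j ∧ n < power * p ^ j ∧
        (j = 0 ∨ power * p ^ (j - 1) ≤ n) := by
  intro fuel
  induction fuel with
  | zero =>
    intro power h1 h2
    exact ⟨0, by simp [pvLoop1], by simpa using h2, Or.inl rfl⟩
  | succ f ih =>
    intro power h1 h2
    by_cases hc : power ≤ n
    · have h1' : 1 ≤ power * p := by nlinarith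
      have h2' : n < power * p * p ^ f := by
        calc n < power * p ^ (f + 1) := h2
          _ = power * p * p ^ f := by rw [pow_succ']; ring
      obtain ⟨j, e1, e2, e3⟩ := ih (power * p) h1' h2'
      refine ⟨j + 1, ?_, ?_, Or.inr ?_⟩
      · rw [pvLoop1, if_pos hc, e1, pow_succ']; ring
      · calc n < power * p * p ^ j := e2
          _ = power * p ^ (j + 1) := by rw [pow_succ']; ring
      · rcases e3 with h | h
        · subst h; simpa using hc
        · rcases j with _ | k
          · simpa using hc
          · have he : power * p ^ (k + 1 + 1 - 1) = power * p * p ^ (k + 1 - 1) := by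
              simp only [Nat.add_sub_cancel]; rw [pow_succ]; ring
            rw [he]; exact h
    · exact ⟨0, by rw [pvLoop1, if_neg hc]; simp, by simpa using (by omega : n < power), Or.inl rfl⟩

-- A's second loop, started at power = p^j with m < p^(j+1), computes the digit sum
lemma pvLoop2_eq (p : Int) (hp : 2 ≤ p) :
    ∀ (j : Nat), ∀ (fuel : Nat) (m : Nat) (acc : Int), j + 2 ≤ fuel →
      m < p.toNat ^ (j + 1) →
      pvLoop2 p fuel (m : Int) (p ^ j) acc = acc + (pvDS p.toNat m : Int) := by
  have hpc : ((p.toNat : Nat) : Int) = p := Int.toNat_of_nonneg (by omega)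
  have hP : 2 ≤ p.toNat := by omega
  have hpow : ∀ k : Nat, (p : Int) ^ k = ((p.toNat ^ k : Nat) : Int) := by
    intro k; rw [← hpc]; push_cast; rfl
  have hdivp : ∀ (m k : Nat), PySem.Int.floordiv (m : Int) ((p.toNat ^ k : Nat) : Int) =
      ((m / p.toNat ^ k : Nat) : Int) := fun m k => PySem.Int.floordiv_natCast m (p.toNat ^ k)
  intro j
  induction j with
  | zero =>
    intro fuel m acc hf hm
    obtain ⟨f, rfl⟩ : ∃ f, fuel = f + 1 := ⟨fuel - 1, by omega⟩
    obtain ⟨f', rfl⟩ : ∃ f', f = f' + 1 := ⟨f - 1, by omega⟩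
    have hd : PySem.Int.floordiv (m : Int) ((p : Int) ^ 0) = (m : Int) := by
      rw [pow_zero]
      have := PySem.Int.floordiv_natCast m 1
      simpa using this
    have hpw : PySem.Int.floordiv ((p : Int) ^ 0) p = 0 := by
      rw [pow_zero, PySem.Int.floordiv_eq_ediv_of_pos (by omega)]
      exact Int.ediv_eq_zero_of_lt (by omega) (by omega)
    rw [pvLoop2, if_pos (by norm_num), hd, hpw]
    have : (m : Int) - (m : Int) * (p : Int) ^ 0 = ((0 : Nat) : Int) := by simp
    rw [this, pvLoop2, if_neg (by omega)]
    rw [pvDS_small p.toNat hP m (by simpa using hm)]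
  | succ j ih =>
    intro fuel m acc hf hm
    obtain ⟨f, rfl⟩ : ∃ f, fuel = f + 1 := ⟨fuel - 1, by omega⟩
    have hpos : (1 : Int) ≤ (p : Int) ^ (j + 1) := one_le_pow₀ (by omega)
    have hd : PySem.Int.floordiv (m : Int) ((p : Int) ^ (j + 1)) =
        ((m / p.toNat ^ (j + 1) : Nat) : Int) := by rw [hpow]; exact hdivp m (j + 1)
    have hpw : PySem.Int.floordiv ((p : Int) ^ (j + 1)) p = (p : Int) ^ j := by
      rw [PySem.Int.floordiv_eq_ediv_of_pos (by omega), pow_succ]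
      exact Int.mul_ediv_cancel _ (by omega)
    have hrem : (m : Int) - ((m / p.toNat ^ (j + 1) : Nat) : Int) * (p : Int) ^ (j + 1) =
        ((m % p.toNat ^ (j + 1) : Nat) : Int) := by
      rw [hpow]
      have h := Nat.div_add_mod m (p.toNat ^ (j + 1))
      have h' : ((p.toNat ^ (j + 1) : Nat) : Int) * ((m / p.toNat ^ (j + 1) : Nat) : Int) +
          ((m % p.toNat ^ (j + 1) : Nat) : Int) = (m : Int) := by exact_mod_cast h
      linarith
    rw [pvLoop2, if_pos hpos, hd, hpw, hrem,
      ih f (m % p.toNat ^ (j + 1)) _ (by omega) (Nat.mod_lt _ (pow_pos (by omega) _))]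
    have hsplit := pvDS_split p.toNat hP (j + 1) m
    have hsmall : pvDS p.toNat (m / p.toNat ^ (j + 1)) = m / p.toNat ^ (j + 1) := by
      apply pvDS_small p.toNat hP
      rw [Nat.div_lt_iff_lt_mul (pow_pos (by omega) _)]
      calc m < p.toNat ^ (j + 1 + 1) := hm
        _ = p.toNat * p.toNat ^ (j + 1) := pow_succ' _ _
    rw [hsplit, hsmall]
    push_cast
    ring

-- early-exit lemmas (any fuel)
lemma pvLoop1_stop (n p : Int) (fuel : Nat) (power : Int) (h : n < power) :
    pvLoop1 n p fuel power = power := by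
  cases fuel with
  | zero => rfl
  | succ f => rw [pvLoop1, if_neg (by omega)]

lemma pvLoop2_stop (p : Int) (fuel : Nat) (m power result : Int) (h : power < 1) :
    pvLoop2 p fuel m power result = result := by
  cases fuel with
  | zero => rfl
  | succ f => rw [pvLoop2, if_neg (by omega)]

lemma pvLoopB_stop (p : Int) (fuel : Nat) (m result : Int) (h : m ≤ 0) :
    pvLoopB p fuel m result = result := by
  cases fuel with
  | zero => rfl
  | succ f => rw [pvLoopB, if_neg (by omega)]

lemma pow_ge_big (p : Int) (hp : 2 ≤ p) : (2147483648 : Int) < p ^ 100 := by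
  calc (2147483648 : Int) < 2 ^ 100 := by norm_num
    _ ≤ p ^ 100 := pow_le_pow_left₀ (by omega) hp 100

-- ===== VERDICT (by name: the statement is the Claim_ definition above) =====
theorem digit_sum_base_p_spec : Claim_equal_digit_sum_base_p := by
  unfold Claim_equal_digit_sum_base_p
  intro n p hdom hpre
  unfold Spec_digit_sum_base_p digit_sum_base_p digit_sum_base_p_alt
  have hn31 : n ≤ 2147483648 := by
    simp only [Dom_digit_sum_base_p, pvDomInt, Bool.and_eq_true, decide_eq_true_eq] at hdom
    exact hdom.1.2
  rcases hpre with hp | ⟨hn, hpneg⟩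
  · -- p ≥ 2
    by_cases hn : n ≤ 0
    · -- n ≤ 0 : both sides are 0
      rw [pvLoop1_stop n p 100 1 (by omega)]
      have h1 : PySem.Int.floordiv 1 p = 0 := by
        rw [PySem.Int.floordiv_eq_ediv_of_pos (by omega)]
        exact Int.ediv_eq_zero_of_lt (by omega) (by omega)
      rw [h1, pvLoop2_stop p 100 n 0 0 (by omega), pvLoopB_stop p 100 n 0 hn]
    · -- n ≥ 1
      push_neg at hn
      have hm : ((n.toNat : Nat) : Int) = n := Int.toNat_of_nonneg (by omega)
      obtain ⟨j, e1, e2, e3⟩ := pvLoop1_spec n p hp 100 1 (by omega)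
        (by have := pow_ge_big p hp; omega)
      rcases j with _ | k
      · simp at e2; omega
      · rcases e3 with h | h
        · omega
        · have hk31 : k ≤ 31 := by
            by_contra hk
            have h2k : (2 : Int) ^ 32 ≤ p ^ k := by
              calc (2 : Int) ^ 32 ≤ 2 ^ k := pow_le_pow_right₀ (by omega) (by omega)
                _ ≤ p ^ k := pow_le_pow_left₀ (by omega) hp k
            have : (2 : Int) ^ 32 = 4294967296 := by norm_num
            simp at h
            omega
          have hpk : PySem.Int.floordiv (1 * p ^ (k + 1)) p = p ^ k := by
            rw [one_mul, PySem.Int.floordiv_eq_ediv_of_pos (by omega), pow_succ]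
            exact Int.mul_ediv_cancel _ (by omega)
          rw [e1, hpk]
          have hmP : n.toNat < p.toNat ^ (k + 1) := by
            have hpow : (p : Int) ^ (k + 1) = ((p.toNat ^ (k + 1) : Nat) : Int) := by
              rw [← Int.toNat_of_nonneg (show (0:Int) ≤ p by omega)]; push_cast; rfl
            rw [one_mul, hpow] at e2
            omega
          have hmB : n.toNat < p.toNat ^ 100 := by
            have : (2 : Nat) ^ 100 ≤ p.toNat ^ 100 := Nat.pow_le_pow_left (by omega) 100
            have h2 : n.toNat ≤ 2147483648 := by omega
            have : (2147483648 : Nat) < 2 ^ 100 := by norm_num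
            omega
          rw [← hm, pvLoop2_eq p hp k 100 n.toNat 0 (by omega) hmP,
            pvLoopB_eq p hp 100 n.toNat 0 hmB]
  · -- n ≤ 0, p ≤ -1 : both sides are 0
    rw [pvLoop1_stop n p 100 1 (by omega)]
    have hq : PySem.Int.floordiv 1 p < 1 := by
      have h1 := PySem.Int.floordiv_mul_add_mod 1 p
      have h2 := PySem.Int.mod_neg_bounds (a := 1) (b := p) (by omega)
      nlinarith [h2.1, h2.2]
    rw [pvLoop2_stop p 100 n _ 0 hq, pvLoopB_stop p 100 n 0 hn]
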